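-- pv_equiv track=rewrite | github.com/Royeqiu/Sentence_generator | sentence_generator.py | set_next_pos_dict
-- ===== SOURCE A (Python) =====
-- def set_next_pos_dict(pos_stories):
--     next_pos_dict=dict()
--     for pos_story in pos_stories:
--         for i,pos in enumerate(pos_story):
--             if i==len(pos_story)-1:
--                 break
--             if pos not in next_pos_dict.keys():
--                 next_pos_list=[]
--                 next_pos_list.append(pos_story[i+1])
--                 next_pos_dict[pos]=next_pos_list
--             else:
--                 if pos_story[i+1] not in next_pos_dict[pos]:
--                     next_pos_dict[pos].append(pos_story[i+1])
--     return next_pos_dict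
-- ===== SOURCE B (Python) =====
-- def set_next_pos_dict(pos_stories):
--     # Flatten all stories into one global stream of adjacent (pos, next) pairs.
--     pairs = [(p, n) for story in pos_stories for p, n in zip(story, story[1:])]
--     # Key order = first occurrence of each pos in the pair stream.
--     keys = list(dict.fromkeys(p for p, _ in pairs))
--     # For each key, grab its successors from the stream and dedup order-preservingly.
--     return {k: list(dict.fromkeys(n for p, n in pairs if p == k)) for k in keys}
-- ===== Notes on version B (the rewrite author's own statement) =====
-- stated objective: alternative
-- what changed: A builds the dict incrementally with a nested loop and an inline membership test per pair; B flattens everything into one global pair stream, computes the key order once by deduplicating the stream's first components, and then groups by key: for each key it filters the stream for that key's successors and dedups them, never building a dict incrementally.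
import Mathlib
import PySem

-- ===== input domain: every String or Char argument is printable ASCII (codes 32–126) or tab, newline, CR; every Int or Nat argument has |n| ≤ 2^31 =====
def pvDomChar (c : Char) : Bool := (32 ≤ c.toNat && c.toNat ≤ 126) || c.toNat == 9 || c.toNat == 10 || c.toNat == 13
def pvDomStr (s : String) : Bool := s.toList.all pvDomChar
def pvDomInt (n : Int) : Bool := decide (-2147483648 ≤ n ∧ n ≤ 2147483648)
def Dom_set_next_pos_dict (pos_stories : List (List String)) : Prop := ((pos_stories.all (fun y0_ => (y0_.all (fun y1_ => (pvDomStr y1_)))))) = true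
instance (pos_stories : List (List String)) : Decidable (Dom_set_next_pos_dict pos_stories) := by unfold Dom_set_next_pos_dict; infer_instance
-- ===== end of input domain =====

-- B replaces A's incremental dict-building with a group-by over one flattened pair stream:
-- key order by a single dedup of the stream's first components, then per-key filter + dedup
-- (alternative decomposition, not claimed faster).


-- ===== PORT A =====
-- one iteration of A's inner loop body at pair (p, n)
def stepA (d : PySem.Dict String (List String)) (p n : String) : PySem.Dict String (List String) :=
  match d.get? p with
  | none => d.insert p [n]
  | some l => if n ∈ l then d else d.insert p (l ++ [n])

-- A's inner enumerate loop with its 'break' at the last index: processes (s[i], s[i+1]) while possible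
def storyA (s : List String) (d : PySem.Dict String (List String)) : PySem.Dict String (List String) :=
  match s with
  | p :: n :: rest => storyA (n :: rest) (stepA d p n)
  | _ => d

def set_next_pos_dict (pos_stories : List (List String)) : List (String × List String) :=
  (pos_stories.foldl (fun d s => storyA s d) PySem.Dict.empty).items

-- ===== PORT B =====
-- the flattened stream of adjacent (pos, next) pairs over all stories
def pairsB (ps : List (List String)) : List (String × String) :=
  ps.flatMap (fun s => s.zip (s.drop 1))

def set_next_pos_dict_alt (ps : List (List String)) : List (String × List String) :=
  let pairs := pairsB ps
  let keys := PySem.List.dedup (pairs.map Prod.fst)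
  keys.map (fun k => (k, PySem.List.dedup ((pairs.filter (fun q => q.1 == k)).map Prod.snd)))

-- ===== PRECONDITION & SPEC =====
def Spec_set_next_pos_dict (pos_stories : List (List String)) (out : List (String × List String)) : Prop := out = set_next_pos_dict_alt pos_stories
instance (pos_stories : List (List String)) (out : List (String × List String)) : Decidable (Spec_set_next_pos_dict pos_stories out) := by unfold Spec_set_next_pos_dict; infer_instance

-- ===== CLAIM (what is proved, stated in full; the proofs are below) =====
def Claim_equal_set_next_pos_dict : Prop := ∀ (pos_stories : List (List String)), Dom_set_next_pos_dict pos_stories → Spec_set_next_pos_dict pos_stories (set_next_pos_dict pos_stories)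

-- ===== LEMMAS AND PROOFS =====

-- B's view of a pair stream: ordered key set and per-key deduped successor list
def bKeys (prs : List (String × String)) : List String :=
  PySem.Set.ofList (prs.map Prod.fst)

def bVal (prs : List (String × String)) (k : String) : List String :=
  PySem.Set.ofList ((prs.filter (fun q => q.1 == k)).map Prod.snd)

def itemsB (prs : List (String × String)) : List (String × List String) :=
  (bKeys prs).map (fun k => (k, bVal prs k))

-- A's inner loop is a fold over the story's adjacent pairs
theorem storyA_eq_foldl (s : List String) (d : PySem.Dict String (List String)) :
    storyA s d = (s.zip (s.drop 1)).foldl (fun d q => stepA d q.1 q.2) d := by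
  induction s generalizing d with
  | nil => rfl
  | cons p t ih =>
    match t with
    | [] => rfl
    | n :: rest => simpa [storyA] using ih (stepA d p n)

-- A's outer loop is a fold over the flattened pair stream
theorem foldA_eq_foldl_pairs (ps : List (List String)) (d : PySem.Dict String (List String)) :
    ps.foldl (fun d s => storyA s d) d = (pairsB ps).foldl (fun d q => stepA d q.1 q.2) d := by
  induction ps generalizing d with
  | nil => rfl
  | cons s t ih =>
    simp only [List.foldl_cons, pairsB, List.flatMap_cons, List.foldl_append]
    rw [storyA_eq_foldl, ih]
    rfl

-- lookup in a dict whose items are keys.map (fun k => (k, f k))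
theorem get?_mk_map (keys : List String) (f : String → List String) (p : String) :
    (PySem.Dict.mk (keys.map (fun k => (k, f k)))).get? p =
      if p ∈ keys then some (f p) else none := by
  induction keys with
  | nil => simp [PySem.Dict.get?]
  | cons k t ih =>
    rw [List.map_cons, PySem.Dict.get?_mk_cons]
    by_cases h : k = p
    · subst h; simp
    · simp only [beq_iff_eq, if_neg h, ih, List.mem_cons]
      by_cases hp : p ∈ t
      · simp [hp]
      · simp [hp, Ne.symm h]

-- per-key value of the extended stream
theorem bVal_append (prs : List (String × String)) (p n k : String) :
    bVal (prs ++ [(p, n)]) k =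
      if k = p then PySem.Set.add (bVal prs k) n else bVal prs k := by
  unfold bVal
  rw [List.filter_append]
  by_cases h : k = p
  · subst h
    simp [PySem.Set.ofList_append_singleton]
  · rw [if_neg h]
    have hpk : (p == k) = false := beq_eq_false_iff_ne.mpr (Ne.symm h)
    have hfil : List.filter (fun q => q.1 == k) [(p, n)] = [] := by
      simp [List.filter, hpk]
    rw [hfil, List.append_nil]

-- the invariant: A's fold over any pair stream has exactly B's items
theorem foldA_items (prs : List (String × String)) :
    prs.foldl (fun d q => stepA d q.1 q.2) PySem.Dict.empty = PySem.Dict.mk (itemsB prs) := by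
  induction prs using List.reverseRecOn with
  | nil => rfl
  | append_singleton prs q ih =>
    obtain ⟨p, n⟩ := q
    rw [List.foldl_append, ih]
    have hget : (PySem.Dict.mk (itemsB prs)).get? p =
        (if p ∈ bKeys prs then some (bVal prs p) else none) := by
      unfold itemsB; exact get?_mk_map _ _ _
    have hkeys : bKeys (prs ++ [(p, n)]) = PySem.Set.add (bKeys prs) p := by
      unfold bKeys
      rw [List.map_append]
      exact PySem.Set.ofList_append_singleton _ _
    by_cases hp : p ∈ bKeys prs
    · -- key already present: value list is bVal prs p
      rw [if_pos hp] at hget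
      show stepA (PySem.Dict.mk (itemsB prs)) p n = _
      unfold stepA
      rw [hget]
      show (if n ∈ bVal prs p then PySem.Dict.mk (itemsB prs)
            else (PySem.Dict.mk (itemsB prs)).insert p (bVal prs p ++ [n])) =
          PySem.Dict.mk (itemsB (prs ++ [(p, n)]))
      have hveq : ∀ k ∈ bKeys prs, k ≠ p → bVal (prs ++ [(p, n)]) k = bVal prs k := by
        intro k _ hk; rw [bVal_append, if_neg hk]
      by_cases hn : n ∈ bVal prs p
      · rw [if_pos hn]
        apply PySem.Dict.ext
        show itemsB prs = itemsB (prs ++ [(p, n)])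
        unfold itemsB
        rw [hkeys, PySem.Set.add_of_mem hp]
        apply List.map_congr_left
        intro k hk
        by_cases hkp : k = p
        · subst hkp
          rw [bVal_append, if_pos rfl, PySem.Set.add_of_mem hn]
        · rw [hveq k hk hkp]
      · rw [if_neg hn]
        apply PySem.Dict.ext
        have hct : (PySem.Dict.mk (itemsB prs)).contains p = true := by
          rw [PySem.Dict.contains_eq_isSome_get?, hget]; rfl
        rw [PySem.Dict.items_insert_of_contains _ _ hct]
        show (itemsB prs).map _ = itemsB (prs ++ [(p, n)])
        unfold itemsB
        rw [hkeys, PySem.Set.add_of_mem hp, List.map_map]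
        apply List.map_congr_left
        intro k hk
        simp only [Function.comp]
        by_cases hkp : k = p
        · subst hkp
          rw [if_pos (by simp), bVal_append, if_pos rfl, PySem.Set.add_of_not_mem hn]
        · rw [if_neg (by simpa using hkp), hveq k hk hkp]
    · -- fresh key: A inserts [n] at the end
      rw [if_neg hp] at hget
      show stepA (PySem.Dict.mk (itemsB prs)) p n = _
      unfold stepA
      rw [hget]
      show (PySem.Dict.mk (itemsB prs)).insert p [n] = PySem.Dict.mk (itemsB (prs ++ [(p, n)]))
      apply PySem.Dict.ext
      have hcf : (PySem.Dict.mk (itemsB prs)).contains p = false := by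
        rw [PySem.Dict.contains_eq_isSome_get?, hget]; rfl
      rw [PySem.Dict.items_insert_of_not_contains _ _ hcf]
      show itemsB prs ++ [(p, [n])] = itemsB (prs ++ [(p, n)])
      unfold itemsB
      rw [hkeys, PySem.Set.add_of_not_mem hp, List.map_append]
      have hpf : p ∉ prs.map Prod.fst := by
        simpa [bKeys, PySem.Set.mem_ofList] using hp
      congr 1
      · apply List.map_congr_left
        intro k hk
        rw [bVal_append, if_neg (fun h : k = p => hp (h ▸ hk))]
      · have hfil : prs.filter (fun q => q.1 == p) = [] := by
          rw [List.filter_eq_nil_iff]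
          intro q hq hqp
          exact hpf (List.mem_map.2 ⟨q, hq, by simpa using hqp⟩)
        rw [List.map_cons, bVal_append, if_pos rfl]
        unfold bVal
        rw [hfil]
        rfl

-- ===== VERDICT (by name: the statement is the Claim_ definition above) =====
theorem set_next_pos_dict_spec : Claim_equal_set_next_pos_dict := by
  intro ps _
  show set_next_pos_dict ps = set_next_pos_dict_alt ps
  unfold set_next_pos_dict set_next_pos_dict_alt
  rw [foldA_eq_foldl_pairs, foldA_items]
  simp only [PySem.List.dedup_eq_ofList]
  rfl
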